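-- pv_equiv track=rewrite | github.com/fishsauce-05/PythonInPTIT | PY01060.py | solve
-- ===== SOURCE A (Python) =====
-- def solve(nums):
-- 	even, odd = 1, 0
-- 	n = len(nums)
-- 	for i in range(n):
-- 		if i & 1:
-- 			odd += nums[i]
-- 		else:
-- 			if nums[i] != 0:
-- 				even *= nums[i]
-- 	return (even, odd)
-- ===== SOURCE B (Python) =====
-- def solve(nums):
-- 	even = 1
-- 	for x in nums[::2]:
-- 		if x:
-- 			even *= x
-- 	return (even, sum(nums[1::2]))
-- ===== Notes on version B (the rewrite author's own statement) =====
-- stated objective: simpler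
-- what changed: Replaces the interleaved index-parity loop over range(len(nums)) with stride-2 slices: a product pass over nums[::2] (skipping zeros) and sum(nums[1::2]), with no index arithmetic.
import Mathlib
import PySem

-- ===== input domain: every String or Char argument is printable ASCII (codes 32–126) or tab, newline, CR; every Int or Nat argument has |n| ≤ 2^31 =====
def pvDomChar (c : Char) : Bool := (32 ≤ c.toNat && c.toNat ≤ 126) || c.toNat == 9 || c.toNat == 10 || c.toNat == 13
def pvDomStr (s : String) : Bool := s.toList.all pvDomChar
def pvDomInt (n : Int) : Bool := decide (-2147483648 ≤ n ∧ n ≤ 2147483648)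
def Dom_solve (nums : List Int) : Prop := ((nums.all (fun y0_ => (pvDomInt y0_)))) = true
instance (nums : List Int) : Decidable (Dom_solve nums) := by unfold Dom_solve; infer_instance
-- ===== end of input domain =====

-- B replaces A's interleaved index-parity loop with two stride-2 passes (slices nums[::2] / nums[1::2]); objective: simpler.


-- ===== PORT A =====
-- for i in range(n): if i & 1: odd += nums[i] else: if nums[i] != 0: even *= nums[i]
-- Python's `i & 1` is ported as Int.land i 1 (exact on the Int indices produced by range).
def solve (nums : List Int) : Int × Int :=
  let n : Int := nums.length
  ((PySem.List.pyRange 0 n 1).foldl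
    (fun (s : Int × Int) i =>
      if Int.land i 1 ≠ 0 then (s.1, s.2 + PySem.List.pyGetD nums i 0)
      else if PySem.List.pyGetD nums i 0 ≠ 0 then (s.1 * PySem.List.pyGetD nums i 0, s.2)
      else s)
    (1, 0))

-- ===== PORT B =====
-- pvStride2 xs = xs[::2]; PySem has no step-2 slice, so it is written by hand (exact: every
-- second element starting at index 0); xs[1::2] is then pvStride2 xs.tail.
def pvStride2 : List Int → List Int
  | [] => []
  | [x] => [x]
  | x :: _ :: rest => x :: pvStride2 rest

def solve_alt (nums : List Int) : Int × Int :=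
  ((pvStride2 nums).foldl (fun e x => if x ≠ 0 then e * x else e) 1,
   (pvStride2 (nums.drop 1)).foldl (· + ·) 0)

-- ===== PRECONDITION & SPEC =====
def Spec_solve (nums : List Int) (out : Int × Int) : Prop := out = solve_alt nums
instance (nums : List Int) (out : Int × Int) : Decidable (Spec_solve nums out) := by unfold Spec_solve; infer_instance

-- ===== CLAIM (what is proved, stated in full; the proofs are below) =====
def Claim_equal_solve : Prop := ∀ (nums : List Int), Dom_solve nums → Spec_solve nums (solve nums)

-- ===== LEMMAS AND PROOFS =====

theorem pv_land_one (a : Nat) : Int.land (a : Int) 1 = ((a % 2 : Nat) : Int) := by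
  show Int.land (Int.ofNat a) (Int.ofNat 1) = _
  simp [Int.land, Nat.and_one_is_mod]

theorem pvStride2_cons (x : Int) (l : List Int) :
    pvStride2 (x :: l) = x :: pvStride2 l.tail := by
  cases l <;> simp [pvStride2]

theorem pv_foldl_mulif (l : List Int) : ∀ (e : Int),
    l.foldl (fun e x => if x ≠ 0 then e * x else e) e
      = e * l.foldl (fun e x => if x ≠ 0 then e * x else e) 1 := by
  induction l with
  | nil => intro e; simp
  | cons x t ih =>
      intro e
      simp only [List.foldl_cons]
      rw [ih (if x ≠ 0 then e * x else e), ih (if x ≠ 0 then 1 * x else 1)]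
      split_ifs <;> ring

theorem pv_foldl_add (l : List Int) : ∀ (o : Int),
    l.foldl (· + ·) o = o + l.foldl (· + ·) 0 := by
  induction l with
  | nil => intro o; simp
  | cons x t ih =>
      intro o
      simp only [List.foldl_cons]
      rw [ih (o + x), ih (0 + x)]
      ring

-- A's loop from index a onwards, when full.drop a = suf, computes B's two stride-2 folds on suf
-- (swapped when a is odd).
theorem pv_loopA (suf : List Int) : ∀ (full : List Int) (a : Nat) (e o : Int),
    full.drop a = suf →
    (PySem.List.pyRange (a : Int) (full.length : Int) 1).foldl
      (fun (s : Int × Int) i =>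
        if Int.land i 1 ≠ 0 then (s.1, s.2 + PySem.List.pyGetD full i 0)
        else if PySem.List.pyGetD full i 0 ≠ 0 then (s.1 * PySem.List.pyGetD full i 0, s.2)
        else s)
      (e, o)
    = (if a % 2 = 0
        then (e * (pvStride2 suf).foldl (fun e x => if x ≠ 0 then e * x else e) 1,
              o + (pvStride2 suf.tail).foldl (· + ·) 0)
        else (e * (pvStride2 suf.tail).foldl (fun e x => if x ≠ 0 then e * x else e) 1,
              o + (pvStride2 suf).foldl (· + ·) 0)) := by
  induction suf with
  | nil =>
      intro full a e o h
      have ha : full.length ≤ a := by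
        by_contra hc
        push Not at hc
        have := List.drop_eq_nil_iff.mp h
        omega
      rw [PySem.List.pyRange_one_eq_nil (by exact_mod_cast ha)]
      split_ifs <;> simp [pvStride2]
  | cons x rest ih =>
      intro full a e o h
      have ha : a < full.length := by
        by_contra hc
        push Not at hc
        rw [List.drop_eq_nil_iff.mpr (by omega)] at h
        cases h
      have hget : PySem.List.pyGetD full (a : Int) 0 = x := by
        rw [PySem.List.pyGetD_natCast]
        have h0 : full[a]? = some x := by
          have h1 : (full.drop a)[0]? = full[a + 0]? := List.getElem?_drop
          rw [h] at h1
          simpa using h1.symm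
        simp [List.getD_eq_getElem?_getD, h0]
      have hrest : full.drop (a + 1) = rest := by
        have h2 : (full.drop a).tail = full.drop (a + 1) := List.tail_drop
        rw [h] at h2
        simpa using h2.symm
      rw [PySem.List.pyRange_one_cons (by exact_mod_cast ha)]
      simp only [List.foldl_cons]
      have hcast : ((a : Int) + 1) = ((a + 1 : Nat) : Int) := by push_cast; ring
      have hland : Int.land ((a : Nat) : Int) 1 = ((a % 2 : Nat) : Int) := pv_land_one a
      rcases Nat.mod_two_eq_zero_or_one a with hp | hp
      · -- even index: product step
        have hcond : ¬ (Int.land ((a : Nat) : Int) 1 ≠ 0) := by rw [hland, hp]; simp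
        simp only [hcond, if_false, hget]
        have hIH := fun e' o' => ih full (a + 1) e' o' hrest
        have hp1 : ¬ ((a + 1) % 2 = 0) := by omega
        simp only [hp1, if_false] at hIH
        by_cases hx : x = 0
        · simp only [hx, ne_eq, not_true_eq_false, if_false]
          rw [hcast, hIH e o, if_pos hp]
          simp [pvStride2_cons]
        · simp only [ne_eq, hx, not_false_eq_true, if_true]
          rw [hcast, hIH (e * x) o, if_pos hp, pvStride2_cons]
          simp only [List.tail_cons, List.foldl_cons]
          rw [if_pos hx, one_mul, pv_foldl_mulif (pvStride2 rest.tail) x]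
          simp [mul_assoc]
      · -- odd index: sum step
        have hcond : (Int.land ((a : Nat) : Int) 1 ≠ 0) := by rw [hland, hp]; simp
        rw [if_pos hcond, hget]
        have hIH := fun e' o' => ih full (a + 1) e' o' hrest
        have hp1 : (a + 1) % 2 = 0 := by omega
        simp only [hp1, if_true] at hIH
        rw [hcast, hIH e (o + x), if_neg (by omega : ¬ a % 2 = 0)]
        simp only [pvStride2_cons, List.tail_cons, List.foldl_cons, zero_add]
        rw [pv_foldl_add (pvStride2 rest.tail) x]
        simp [add_assoc]

-- ===== VERDICT (by name: the statement is the Claim_ definition above) =====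
theorem solve_spec : Claim_equal_solve := by
  intro nums _
  unfold Spec_solve solve solve_alt
  have h := pv_loopA nums nums 0 1 0 (by simp)
  simp only [Nat.cast_zero] at h
  rw [h]
  simp [List.drop_one]
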